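-- pv_equiv track=rewrite | github.com/foundev/foundev.github.io | convert.py | read_md_file
-- ===== SOURCE A (Python) =====
-- def read_md_file(md):
--     found_header_start = False
--     found_header = False
--     read = False
--     lines = []
--     header = ["---"]
--     for line in md.split("\n"):
--         if read:
--             lines.append(line)
--         else:
--             if line == "---":
--                 if found_header_start:
--                     read = True
--                 else:
--                     found_header_start = True
--             else:
--                 header.append(line)
--     header.append("---")
--     header_str = "\n".join(header)
--     body_str = "\n".join(lines)
--     return header_str, body_str
-- ===== SOURCE B (Python) =====
-- def split_at_dash(lines):
--     """(lines before the first '---' line, lines after it), or None if absent."""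
--     for i, l in enumerate(lines):
--         if l == "---":
--             return lines[:i], lines[i + 1:]
--     return None
--
-- def read_md_file(md):
--     lines = md.split("\n")
--     first = split_at_dash(lines)
--     if first is None:
--         return "\n".join(["---"] + lines + ["---"]), ""
--     pre, rest = first
--     second = split_at_dash(rest)
--     if second is None:
--         return "\n".join(["---"] + pre + rest + ["---"]), ""
--     mid, body = second
--     return "\n".join(["---"] + pre + mid + ["---"]), "\n".join(body)
-- ===== Notes on version B (the rewrite author's own statement) =====
-- stated objective: simpler
-- what changed: Replaced the three-flag state machine with a find-then-slice decomposition: a helper splits the line list at the first '---' line, applied twice, and the header/body are assembled from the resulting slices.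
import Mathlib
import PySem

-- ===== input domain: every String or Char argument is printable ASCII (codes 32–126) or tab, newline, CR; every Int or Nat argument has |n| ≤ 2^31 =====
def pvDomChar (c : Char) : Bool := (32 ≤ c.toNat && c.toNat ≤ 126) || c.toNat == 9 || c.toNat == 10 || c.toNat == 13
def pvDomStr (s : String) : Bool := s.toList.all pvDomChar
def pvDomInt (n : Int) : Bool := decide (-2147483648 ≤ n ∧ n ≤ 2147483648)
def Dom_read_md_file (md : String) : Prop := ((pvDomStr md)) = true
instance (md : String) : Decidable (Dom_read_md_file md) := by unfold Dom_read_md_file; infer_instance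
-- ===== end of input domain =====

-- B replaces A's three-flag state machine by splitting the line list at the first two
-- '---' delimiter lines (find-then-slice); simpler decomposition, same cost.
-- (A's 'found_header' flag is never read in A's code, so it carries no state here.)

-- ===== PORT A =====
-- A's for-loop over the split lines, as structural recursion on the same state
-- (found_header_start, read, lines, header).
def readMdLoopA (fhs rd : Bool) (lns header : List String) : List String → List String × List String
  | [] => (header, lns)
  | l :: rest =>
    if rd then readMdLoopA fhs rd (lns ++ [l]) header rest
    else if l == "---" then
      if fhs then readMdLoopA fhs true lns header rest
      else readMdLoopA true rd lns header rest
    else readMdLoopA fhs rd lns (header ++ [l]) rest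

def read_md_file (md : String) : String × String :=
  let st := readMdLoopA false false [] ["---"] ((PySem.Str.split? md "\n").getD [])
  (PySem.Str.join "\n" (st.1 ++ ["---"]), PySem.Str.join "\n" st.2)

-- ===== PORT B =====
-- Source B's split_at_dash: scan for the first '---' line, return (lines before it, lines
-- after it); the indexed scan with slices is transcribed as structural recursion.
def splitAtDash : List String → Option (List String × List String)
  | [] => none
  | l :: rest =>
    if l == "---" then some ([], rest)
    else match splitAtDash rest with
      | none => none
      | some (p, r) => some (l :: p, r)

def read_md_file_alt (md : String) : String × String :=
  let lines := (PySem.Str.split? md "\n").getD []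
  match splitAtDash lines with
  | none => (PySem.Str.join "\n" (["---"] ++ lines ++ ["---"]), "")
  | some (pre, rest) =>
    match splitAtDash rest with
    | none => (PySem.Str.join "\n" (["---"] ++ pre ++ rest ++ ["---"]), "")
    | some (mid, body) =>
      (PySem.Str.join "\n" (["---"] ++ pre ++ mid ++ ["---"]), PySem.Str.join "\n" body)

-- ===== PRECONDITION & SPEC =====
def Spec_read_md_file (md : String) (out : String × String) : Prop := out = read_md_file_alt md
instance (md : String) (out : String × String) : Decidable (Spec_read_md_file md out) := by unfold Spec_read_md_file; infer_instance

-- ===== CLAIM (what is proved, stated in full; the proofs are below) =====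
def Claim_equal_read_md_file : Prop := ∀ (md : String), Dom_read_md_file md → Spec_read_md_file md (read_md_file md)

-- ===== LEMMAS AND PROOFS =====

-- Once read = true, A just appends every remaining line to lns.
theorem readMdLoopA_read (L : List String) : ∀ (fhs : Bool) (lns header : List String),
    readMdLoopA fhs true lns header L = (header, lns ++ L) := by
  induction L with
  | nil => intro fhs lns header; simp [readMdLoopA]
  | cons l rest ih => intro fhs lns header; simp [readMdLoopA, ih]

-- After the first '---' (found_header_start = true), A's loop is "split at the next '---'".
theorem readMdLoopA_one (L : List String) : ∀ (lns header : List String),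
    readMdLoopA true false lns header L =
      match splitAtDash L with
      | none => (header ++ L, lns)
      | some (p, r) => (header ++ p, lns ++ r) := by
  induction L with
  | nil => intro lns header; simp [readMdLoopA, splitAtDash]
  | cons l rest ih =>
    intro lns header
    by_cases h : l == "---"
    · simp [readMdLoopA, splitAtDash, h, readMdLoopA_read]
    · simp only [readMdLoopA, splitAtDash, h, Bool.false_eq_true, if_false, ih]
      cases hs : splitAtDash rest with
      | none => simp
      | some pr => cases pr with | mk p r => simp

-- From the initial state, A's loop is "split at the first two '---' lines".
theorem readMdLoopA_zero (L : List String) : ∀ (lns header : List String),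
    readMdLoopA false false lns header L =
      match splitAtDash L with
      | none => (header ++ L, lns)
      | some (p, r) =>
        match splitAtDash r with
        | none => (header ++ p ++ r, lns)
        | some (m, b) => (header ++ p ++ m, lns ++ b) := by
  induction L with
  | nil => intro lns header; simp [readMdLoopA, splitAtDash]
  | cons l rest ih =>
    intro lns header
    by_cases h : l == "---"
    · simp only [readMdLoopA, splitAtDash, h, if_true, Bool.false_eq_true, if_false,
        readMdLoopA_one]
      cases hs : splitAtDash rest with
      | none => simp
      | some pr => cases pr with | mk p r => simp
    · simp only [readMdLoopA, splitAtDash, h, Bool.false_eq_true, if_false, ih]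
      cases hs : splitAtDash rest with
      | none => simp
      | some pr =>
        cases pr with | mk p r =>
        cases hs2 : splitAtDash r with
        | none => simp
        | some mb => cases mb with | mk m b => simp

-- ===== VERDICT (by name: the statement is the Claim_ definition above) =====
theorem read_md_file_spec : Claim_equal_read_md_file := by
  intro md _
  unfold Spec_read_md_file read_md_file read_md_file_alt
  simp only [readMdLoopA_zero]
  cases hs : splitAtDash ((PySem.Str.split? md "\n").getD []) with
  | none => simp [PySem.Str.join, PySem.Chars.join, List.intercalate]
  | some pr =>
    cases pr with | mk p r =>
    cases hs2 : splitAtDash r with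
    | none => simp [hs2, PySem.Str.join, PySem.Chars.join, List.intercalate]
    | some mb => cases mb with | mk m b => simp [hs2]
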